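-- pv_equiv track=rewrite | github.com/aldewereld/AventOfCode | 2019/day04/day4.py | has_double_but_not_larger
-- ===== SOURCE A (Python) =====
-- from typing import List
--
-- def has_double_but_not_larger(input: List[int], count: int = 0) -> bool:
--     if len(input) == 1 and count == 1:
--         return True
--     elif len(input) == 1:
--         return False
--     else:
--         head1, head2, *tail = input
--         if not head1 == head2 and count == 1:
--             return True
--         elif head1 == head2:
--             return has_double_but_not_larger([head2]+tail,count+1)
--         else:
--             return has_double_but_not_larger([head2]+tail)
-- ===== SOURCE B (Python) =====
-- from typing import List
--
-- def has_double_but_not_larger(input: List[int], count: int = 0) -> bool: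
--     c = count
--     for a, b in zip(input, input[1:]):
--         if a == b:
--             c += 1
--         elif c == 1:
--             return True
--         else:
--             c = 0
--     return c == 1
-- ===== Notes on version B (the rewrite author's own statement) =====
-- stated objective: faster
-- what changed: Replaced O(n^2) list-rebuilding recursion with a single linear pass over adjacent pairs (zip) tracking the current run-pair counter.
import Mathlib
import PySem

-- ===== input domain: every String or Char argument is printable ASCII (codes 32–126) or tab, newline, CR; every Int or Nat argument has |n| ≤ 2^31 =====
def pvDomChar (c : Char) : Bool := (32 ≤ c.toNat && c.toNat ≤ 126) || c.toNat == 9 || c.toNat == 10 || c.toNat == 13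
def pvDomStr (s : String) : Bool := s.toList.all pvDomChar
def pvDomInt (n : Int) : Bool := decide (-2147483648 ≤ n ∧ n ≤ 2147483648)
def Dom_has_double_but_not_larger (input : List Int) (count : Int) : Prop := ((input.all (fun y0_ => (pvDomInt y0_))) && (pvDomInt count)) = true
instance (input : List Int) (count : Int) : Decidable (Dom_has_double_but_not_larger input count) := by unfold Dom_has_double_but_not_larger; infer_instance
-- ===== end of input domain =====

-- B replaces A's O(n^2) list-rebuilding recursion by one linear pass over adjacent pairs (objective: faster).

-- ===== PORT A =====
-- literal transliteration of A's recursion; the [] case is unreachable under Pre_ (Python raises ValueError there)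
def has_double_but_not_larger : List Int → Int → Bool
  | [], _ => false
  | [_], count => decide (count = 1)
  | h1 :: h2 :: tail, count =>
      if h1 ≠ h2 ∧ count = 1 then true
      else if h1 = h2 then has_double_but_not_larger (h2 :: tail) (count + 1)
      else has_double_but_not_larger (h2 :: tail) 0

-- ===== PORT B =====
-- Source B's for-loop over zip(input, input[1:]) with early return, as a recursion on the pair list
def pvAltLoop : List (Int × Int) → Int → Bool
  | [], c => decide (c = 1)
  | (a, b) :: rest, c =>
      if a = b then pvAltLoop rest (c + 1)
      else if c = 1 then true
      else pvAltLoop rest 0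

def has_double_but_not_larger_alt (input : List Int) (count : Int) : Bool :=
  pvAltLoop (input.zip (PySem.List.slice input (some 1) none)) count

-- ===== PRECONDITION & SPEC =====
-- Pre_ excludes only the empty list, on which Python A raises ValueError
def Pre_has_double_but_not_larger (input : List Int) (count : Int) : Prop := input ≠ []
instance (input : List Int) (count : Int) : Decidable (Pre_has_double_but_not_larger input count) := by unfold Pre_has_double_but_not_larger; infer_instance
def pvWitness_has_double_but_not_larger : List Int × Int := ([1, 1, 2], 0)

def Spec_has_double_but_not_larger (input : List Int) (count : Int) (out : Bool) : Prop := out = has_double_but_not_larger_alt input count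
instance (input : List Int) (count : Int) (out : Bool) : Decidable (Spec_has_double_but_not_larger input count out) := by unfold Spec_has_double_but_not_larger; infer_instance

-- ===== CLAIM =====
def Claim_equal_has_double_but_not_larger : Prop := ∀ (input : List Int) (count : Int), Dom_has_double_but_not_larger input count → Pre_has_double_but_not_larger input count → Spec_has_double_but_not_larger input count (has_double_but_not_larger input count)

-- ===== LEMMAS AND PROOFS =====
lemma main_lemma : ∀ (input : List Int) (count : Int), input ≠ [] →
    has_double_but_not_larger input count = pvAltLoop (input.zip input.tail) count := by
  intro input
  induction input with
  | nil => intro c h; exact absurd rfl h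
  | cons h1 rest ih =>
    intro c _
    cases rest with
    | nil => simp [has_double_but_not_larger, pvAltLoop]
    | cons h2 tail =>
      by_cases he : h1 = h2
      · subst he
        simp [has_double_but_not_larger, pvAltLoop, List.zip]
        exact ih (c + 1) (by simp)
      · by_cases hc : c = 1
        · simp [has_double_but_not_larger, pvAltLoop, he, hc]
        · simp [has_double_but_not_larger, pvAltLoop, he, hc]
          exact ih 0 (by simp)

-- ===== VERDICT =====
theorem has_double_but_not_larger_spec : Claim_equal_has_double_but_not_larger := by
  intro input count _ hpre
  unfold Spec_has_double_but_not_larger has_double_but_not_larger_alt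
  rw [PySem.List.slice_from_one]
  exact main_lemma input count hpre
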